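-- pv_equiv track=rewrite | github.com/TwisterrSociety/ASD_J0403251052_MisaelChristopherHaryanto | Pertemuan-6/bubbleSort.py | bubble_sort_basic
-- ===== SOURCE A (Python) =====
-- def bubble_sort_basic(arr):
--     n = len(arr)
--     comparisons = 0
--     swaps = 0
--
--     for i in range(n):
--         for j in range(0, n - i - 1):
--             comparisons += 1
--             if arr[j] > arr[j + 1]:
--                 arr[j], arr[j + 1] = arr[j + 1], arr[j]
--                 swaps += 1
--
--     return arr, comparisons, swaps
-- ===== SOURCE B (Python) =====
-- # Merge sort with inversion counting: swaps of bubble sort = number of inversions,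
-- # comparisons = n*(n-1)//2 in closed form. (A mutates arr in place; B does not --
-- # the equivalence is about the return value.)
-- def bubble_sort_basic(arr):
--     def sort_count(xs):
--         if len(xs) <= 1:
--             return xs, 0
--         mid = len(xs) // 2
--         left, linv = sort_count(xs[:mid])
--         right, rinv = sort_count(xs[mid:])
--         merged = []
--         inv = linv + rinv
--         i = j = 0
--         while i < len(left) and j < len(right):
--             if left[i] <= right[j]:
--                 merged.append(left[i])
--                 i += 1
--             else:
--                 merged.append(right[j])
--                 j += 1
--                 inv += len(left) - i
--         merged += left[i:]
--         merged += right[j:]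
--         return merged, inv
--
--     n = len(arr)
--     out, swaps = sort_count(list(arr))
--     return out, n * (n - 1) // 2, swaps
-- ===== Notes on version B (the rewrite author's own statement) =====
-- stated objective: faster
-- what changed: Replaces the quadratic bubble loops by a merge sort that counts inversions (= bubble swaps) and computes comparisons by the closed form n*(n-1)//2.
import Mathlib
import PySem

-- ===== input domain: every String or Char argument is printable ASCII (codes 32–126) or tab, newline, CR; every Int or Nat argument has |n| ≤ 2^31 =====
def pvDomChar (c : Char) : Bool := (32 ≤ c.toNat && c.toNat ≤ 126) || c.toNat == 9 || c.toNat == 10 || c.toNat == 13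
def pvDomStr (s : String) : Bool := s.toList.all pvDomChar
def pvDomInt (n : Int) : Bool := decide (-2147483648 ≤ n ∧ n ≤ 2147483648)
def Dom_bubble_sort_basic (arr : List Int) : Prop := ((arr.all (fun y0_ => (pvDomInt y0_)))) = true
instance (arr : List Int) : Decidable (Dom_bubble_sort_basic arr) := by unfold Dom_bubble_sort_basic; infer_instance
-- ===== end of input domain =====

-- B replaces the quadratic bubble loops by a merge sort counting inversions; A mutates its
-- argument in place, B does not — the equivalence proved is about the return value only.

-- ===== PORT A =====
-- Literal transliteration of the nested index loops; every index j, j+1 produced by the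
-- ranges is in bounds, so the total forms pyGetD/pySetD are exact here.
def bubble_sort_basic (arr : List Int) : List Int × Int × Int :=
  let n : Int := arr.length
  (PySem.List.pyRange 0 n 1).foldl (fun st i =>
    (PySem.List.pyRange 0 (n - i - 1) 1).foldl (fun st2 j =>
      let a := st2.1
      let c := st2.2.1 + 1
      let s := st2.2.2
      if PySem.List.pyGetD a j 0 > PySem.List.pyGetD a (j + 1) 0 then
        (PySem.List.pySetD (PySem.List.pySetD a j (PySem.List.pyGetD a (j + 1) 0)) (j + 1)
          (PySem.List.pyGetD a j 0), c, s + 1)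
      else (a, c, s)) st) (arr, 0, 0)

-- ===== PORT B =====
-- merge step of Source B's sort_count: the while loop over indices i, j, rendered as recursion on
-- the two remaining suffixes; `len(left) - i` is the length of the remaining left suffix.
def pvMergeCount : List Int → List Int → List Int × Int
  | [], r => (r, 0)
  | x :: l, [] => (x :: l, 0)
  | x :: l, y :: r =>
    if x ≤ y then
      let p := pvMergeCount l (y :: r)
      (x :: p.1, p.2)
    else
      let p := pvMergeCount (x :: l) r
      (y :: p.1, p.2 + ((x :: l).length : Int))
  termination_by l r => l.length + r.length

-- sort_count of Source B; xs[:mid] / xs[mid:] with 0 ≤ mid are take/drop (PySem.List.slice_to_natCast).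
def pvSortCount (xs : List Int) : List Int × Int :=
  if _h : xs.length ≤ 1 then (xs, 0)
  else
    let mid := xs.length / 2  -- len(xs) // 2 on a nonnegative length: Nat division is exact here
    let lp := pvSortCount (xs.take mid)
    let rp := pvSortCount (xs.drop mid)
    let mp := pvMergeCount lp.1 rp.1
    (mp.1, lp.2 + rp.2 + mp.2)
  termination_by xs.length
  decreasing_by
  · simp only [List.length_take]; omega
  · simp only [List.length_drop]; omega

def bubble_sort_basic_alt (arr : List Int) : List Int × Int × Int :=
  let n : Int := arr.length
  let p := pvSortCount arr
  (p.1, PySem.Int.floordiv (n * (n - 1)) 2, p.2)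

-- ===== PRECONDITION & SPEC =====
def Spec_bubble_sort_basic (arr : List Int) (out : List Int × Int × Int) : Prop := out = bubble_sort_basic_alt arr
instance (arr : List Int) (out : List Int × Int × Int) : Decidable (Spec_bubble_sort_basic arr out) := by unfold Spec_bubble_sort_basic; infer_instance

-- ===== CLAIM (what is proved, stated in full; the proofs are below) =====
def Claim_equal_bubble_sort_basic : Prop := ∀ (arr : List Int), Dom_bubble_sort_basic arr → Spec_bubble_sort_basic arr (bubble_sort_basic arr)


-- ===== LEMMAS AND PROOFS =====

-- number of inversions of a list
def pvInv : List Int → Nat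
  | [] => 0
  | x :: xs => xs.countP (fun y => decide (y < x)) + pvInv xs

-- cross inversions between two blocks
def pvCross (a b : List Int) : Nat := (a.map (fun x => b.countP (fun y => decide (y < x)))).sum

-- one truncated bubble pass: t comparisons over the front of the list
def pvPassN : Nat → List Int → List Int × Nat
  | 0, l => (l, 0)
  | _ + 1, [] => ([], 0)
  | _ + 1, [x] => ([x], 0)
  | t + 1, x :: y :: r =>
    if y < x then
      let p := pvPassN t (x :: r)
      (y :: p.1, p.2 + 1)
    else
      let p := pvPassN t (y :: r)
      (x :: p.1, p.2)

-- the inner loop body of port A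
def pvStep (st : List Int × Int × Int) (j : Int) : List Int × Int × Int :=
  let a := st.1
  let c := st.2.1 + 1
  let s := st.2.2
  if PySem.List.pyGetD a j 0 > PySem.List.pyGetD a (j + 1) 0 then
    (PySem.List.pySetD (PySem.List.pySetD a j (PySem.List.pyGetD a (j + 1) 0)) (j + 1)
      (PySem.List.pyGetD a j 0), c, s + 1)
  else (a, c, s)

-- running comparison count of A after i outer iterations
def pvComps (n : Nat) : Nat → Int
  | 0 => 0
  | i + 1 => pvComps n i + ((n : Int) - i - 1)


theorem pvInv_append (a b : List Int) : pvInv (a ++ b) = pvInv a + pvInv b + pvCross a b := by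
  induction a with
  | nil => simp [pvInv, pvCross]
  | cons x a ih => simp [pvInv, pvCross, List.countP_append, ih]; ring

theorem pvCross_perm_left {a a' : List Int} (h : a.Perm a') (b : List Int) : pvCross a b = pvCross a' b := by
  exact (h.map _).sum_eq

theorem pvCross_perm_right (a : List Int) {b b' : List Int} (h : b.Perm b') : pvCross a b = pvCross a b' := by
  simp [pvCross, h.countP_eq]

theorem pvInv_eq_zero_of_sorted {l : List Int} (h : l.Pairwise (· ≤ ·)) : pvInv l = 0 := by
  induction l with
  | nil => rfl
  | cons x xs ih =>
    rcases List.pairwise_cons.1 h with ⟨hx, hxs⟩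
    simp [pvInv, ih hxs, List.countP_eq_zero]
    intro y hy
    exact hx y hy

theorem pvMergeCount_perm (l r : List Int) : (pvMergeCount l r).1.Perm (l ++ r) := by
  fun_induction pvMergeCount with
  | case1 r => simp
  | case2 x l => simp
  | case3 x l y r hxy p ih => simpa [pvMergeCount, p] using ih.cons x
  | case4 x l y r hxy p ih => exact (ih.cons y).trans List.perm_middle.symm
theorem pvMergeCount_sorted (l r : List Int) (hl : l.Pairwise (· ≤ ·)) (hr : r.Pairwise (· ≤ ·)) :
    (pvMergeCount l r).1.Pairwise (· ≤ ·) := by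
  fun_induction pvMergeCount with
  | case1 r => simpa using hr
  | case2 x l => simpa using hl
  | case3 x l y r hxy p ih =>
    rcases List.pairwise_cons.1 hl with ⟨hx, hl'⟩
    refine List.pairwise_cons.2 ⟨?_, ih hl' hr⟩
    intro z hz
    have := (pvMergeCount_perm l (y :: r)).mem_iff.1 (by simpa [p] using hz)
    rcases List.mem_append.1 this with h1 | h1
    · exact hx z h1
    · rcases List.mem_cons.1 h1 with rfl | h2
      · exact hxy
      · exact le_trans hxy ((List.pairwise_cons.1 hr).1 z h2)
  | case4 x l y r hxy p ih =>
    rcases List.pairwise_cons.1 hr with ⟨hy, hr'⟩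
    refine List.pairwise_cons.2 ⟨?_, ih hl hr'⟩
    intro z hz
    have := (pvMergeCount_perm (x :: l) r).mem_iff.1 (by simpa [p] using hz)
    have hyx : y ≤ x := le_of_not_ge hxy
    rcases List.mem_append.1 this with h1 | h1
    · rcases List.mem_cons.1 h1 with rfl | h2
      · exact hyx
      · exact le_trans hyx ((List.pairwise_cons.1 hl).1 z h2)
    · exact hy z h1

theorem pvMergeCount_count (l r : List Int) (hl : l.Pairwise (· ≤ ·)) (hr : r.Pairwise (· ≤ ·)) :
    (pvMergeCount l r).2 = (pvCross l r : Int) := by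
  fun_induction pvMergeCount with
  | case1 r => simp [pvCross]
  | case2 x l => simp [pvCross]
  | case3 x l y r hxy p ih =>
    rcases List.pairwise_cons.1 hl with ⟨hx, hl'⟩
    have : (y :: r).countP (fun z => decide (z < x)) = 0 := by
      simp [List.countP_eq_zero]
      constructor
      · exact hxy
      · intro z hz; exact le_trans hxy ((List.pairwise_cons.1 hr).1 z hz)
    simp [p, ih hl' hr, pvCross, this]
  | case4 x l y r hxy p ih =>
    rcases List.pairwise_cons.1 hr with ⟨hy, hr'⟩
    have hyx : y < x := lt_of_not_ge hxy
    have key : ∀ u ∈ x :: l, (y :: r).countP (fun z => decide (z < u))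
        = 1 + r.countP (fun z => decide (z < u)) := by
      intro u hu
      have hyu : y < u := by
        rcases List.mem_cons.1 hu with rfl | h2
        · exact hyx
        · exact lt_of_lt_of_le hyx ((List.pairwise_cons.1 hl).1 u h2)
      simp [hyu]; omega
    simp only [p, ih hl hr']
    have hn : ∀ a : List Int, (∀ u ∈ a, (y :: r).countP (fun z => decide (z < u))
        = 1 + r.countP (fun z => decide (z < u))) →
        pvCross a (y :: r) = a.length + pvCross a r := by
      intro a
      induction a with
      | nil => simp [pvCross]
      | cons u a iha =>
        intro hk
        have h1 := hk u (List.mem_cons_self)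
        have h2 := iha (fun v hv => hk v (List.mem_cons_of_mem u hv))
        simp only [pvCross, List.map_cons, List.sum_cons] at h2 ⊢
        rw [h1, h2]
        simp [List.length_cons]
        ring
    rw [hn (x :: l) key]
    push_cast
    ring

theorem pvSortCount_spec (xs : List Int) :
    (pvSortCount xs).1.Perm xs ∧ (pvSortCount xs).1.Pairwise (· ≤ ·) ∧
      (pvSortCount xs).2 = (pvInv xs : Int) := by
  fun_induction pvSortCount with
  | case1 xs h =>
    refine ⟨List.Perm.refl _, ?_, ?_⟩
    · match xs, h with
      | [], _ => exact List.Pairwise.nil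
      | [x], _ => simp
    · match xs, h with
      | [], _ => simp [pvInv]
      | [x], _ => simp [pvInv]
  | case2 xs h mid lp hlp rp hrp ih2 =>
    obtain ⟨p1, s1, i1⟩ := hrp
    obtain ⟨p2, s2, i2⟩ := ih2
    have hperm : rp.1.Perm xs := by
      refine ((pvMergeCount_perm lp.1 hlp.1).trans ?_)
      calc (lp.1 ++ hlp.1).Perm (List.take mid xs ++ List.drop mid xs) := p1.append p2
        _ = xs := List.take_append_drop mid xs
    refine ⟨hperm, pvMergeCount_sorted _ _ s1 s2, ?_⟩
    have hc : (pvMergeCount lp.1 hlp.1).2 = (pvCross lp.1 hlp.1 : Int) := pvMergeCount_count _ _ s1 s2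
    have hcr : pvCross lp.1 hlp.1 = pvCross (List.take mid xs) (List.drop mid xs) := by
      rw [pvCross_perm_left p1, pvCross_perm_right _ p2]
    have hinv : pvInv xs = pvInv (List.take mid xs) + pvInv (List.drop mid xs)
        + pvCross (List.take mid xs) (List.drop mid xs) := by
      conv_lhs => rw [← List.take_append_drop mid xs]
      exact pvInv_append _ _
    show lp.2 + hlp.2 + rp.2 = _
    rw [i1, i2]
    show _ + _ + (pvMergeCount lp.1 hlp.1).2 = _
    rw [hc, hcr, hinv]
    push_cast
    ring

theorem pvPassN_perm (t : Nat) (l : List Int) : (pvPassN t l).1.Perm l := by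
  fun_induction pvPassN with
  | case1 l => exact List.Perm.refl _
  | case2 t => exact List.Perm.refl _
  | case3 t x => exact List.Perm.refl _
  | case4 t x y r h p ih => exact (ih.cons y).trans (List.Perm.swap x y r)
  | case5 t x y r h p ih => exact ih.cons x

theorem pvPassN_inv (t : Nat) (l : List Int) :
    pvInv l = pvInv (pvPassN t l).1 + (pvPassN t l).2 := by
  fun_induction pvPassN with
  | case1 l => simp
  | case2 t => simp
  | case3 t x => simp
  | case4 t x y r h p ih =>
    show pvInv (x :: y :: r) = pvInv (y :: (pvPassN t (x :: r)).1) + ((pvPassN t (x :: r)).2 + 1)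
    have hc : (pvPassN t (x :: r)).1.countP (fun z => decide (z < y))
        = (x :: r).countP (fun z => decide (z < y)) := (pvPassN_perm t (x :: r)).countP_eq _
    have ih' : pvInv (x :: r) = pvInv (pvPassN t (x :: r)).1 + (pvPassN t (x :: r)).2 := ih
    simp only [pvInv, List.countP_cons] at ih' ⊢
    rw [hc]
    simp only [List.countP_cons]
    simp [h, show ¬ x < y by omega]
    omega
  | case5 t x y r h p ih =>
    show pvInv (x :: y :: r) = pvInv (x :: (pvPassN t (y :: r)).1) + (pvPassN t (y :: r)).2
    have hc : (pvPassN t (y :: r)).1.countP (fun z => decide (z < x))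
        = (y :: r).countP (fun z => decide (z < x)) := (pvPassN_perm t (y :: r)).countP_eq _
    have ih' : pvInv (y :: r) = pvInv (pvPassN t (y :: r)).1 + (pvPassN t (y :: r)).2 := ih
    simp only [pvInv, List.countP_cons] at ih' ⊢
    rw [hc]
    simp only [List.countP_cons]
    omega

theorem pvPassN_append (a b : List Int) (ha : a ≠ []) :
    pvPassN (a.length - 1) (a ++ b) =
      ((pvPassN (a.length - 1) a).1 ++ b, (pvPassN (a.length - 1) a).2) := by
  induction hn : a.length using Nat.strong_induction_on generalizing a b with
  | _ n ih =>
    match a, ha with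
    | [x], _ => subst hn; simp [pvPassN]
    | x :: y :: r, _ =>
      subst hn
      show pvPassN (r.length + 1) (x :: y :: (r ++ b)) =
        ((pvPassN (r.length + 1) (x :: y :: r)).1 ++ b, (pvPassN (r.length + 1) (x :: y :: r)).2)
      by_cases hyx : y < x
      · have ihx := ih (x :: r).length (by simp) (x :: r) b (by simp) rfl
        simp only [List.length_cons, Nat.add_sub_cancel] at ihx
        simp only [pvPassN, if_pos hyx]
        rw [show x :: (r ++ b) = (x :: r) ++ b from rfl, ihx]; rfl
      · have ihy := ih (y :: r).length (by simp) (y :: r) b (by simp) rfl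
        simp only [List.length_cons, Nat.add_sub_cancel] at ihy
        simp only [pvPassN, if_neg hyx]
        rw [show y :: (r ++ b) = (y :: r) ++ b from rfl, ihy]; rfl

theorem pvPassN_last_max (a : List Int) (ha : a ≠ []) :
    ∃ a' M, (pvPassN (a.length - 1) a).1 = a' ++ [M] ∧ ∀ z ∈ a, z ≤ M := by
  induction hn : a.length using Nat.strong_induction_on generalizing a with
  | _ n ih =>
    match a, ha with
    | [x], _ => subst hn; exact ⟨[], x, by simp [pvPassN], by simp⟩
    | x :: y :: r, _ =>
      subst hn
      show ∃ a' M, (pvPassN (r.length + 1) (x :: y :: r)).1 = a' ++ [M] ∧ ∀ z ∈ x :: y :: r, z ≤ M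
      by_cases hyx : y < x
      · obtain ⟨a', M, he, hm⟩ := ih (x :: r).length (by simp) (x :: r) (by simp) rfl
        simp only [List.length_cons, Nat.add_sub_cancel] at he
        refine ⟨y :: a', M, ?_, ?_⟩
        · simp only [pvPassN, if_pos hyx, he]; rfl
        · intro z hz
          rcases List.mem_cons.1 hz with rfl | hz2
          · exact hm z List.mem_cons_self
          · rcases List.mem_cons.1 hz2 with rfl | hz3
            · exact le_trans (le_of_lt hyx) (hm x List.mem_cons_self)
            · exact hm z (List.mem_cons_of_mem x hz3)
      · obtain ⟨a', M, he, hm⟩ := ih (y :: r).length (by simp) (y :: r) (by simp) rfl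
        simp only [List.length_cons, Nat.add_sub_cancel] at he
        refine ⟨x :: a', M, ?_, ?_⟩
        · simp only [pvPassN, if_neg hyx, he]; rfl
        · intro z hz
          rcases List.mem_cons.1 hz with rfl | hz2
          · exact le_trans (le_of_not_gt hyx) (hm y List.mem_cons_self)
          · exact hm z hz2

theorem pvGetD_append_mid (pre l : List Int) (z : Int) (d : Int) : (pre ++ z :: l).getD pre.length d = z := by
  simp [List.getD]

theorem pvGetD_append_mid1 (pre l : List Int) (z w : Int) (d : Int) :
    (pre ++ z :: w :: l).getD (pre.length + 1) d = w := by
  simp [List.getD]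

theorem pvInner_bridge (t : Nat) : ∀ (pre cur : List Int) (c s : Int), t + 1 ≤ cur.length →
    (PySem.List.pyRange (pre.length) ((pre.length : Int) + t) 1).foldl pvStep (pre ++ cur, c, s)
      = (pre ++ (pvPassN t cur).1, c + t, s + ((pvPassN t cur).2 : Int)) := by
  induction t with
  | zero =>
    intro pre cur c s h
    rw [PySem.List.pyRange_one_eq_nil (by simp)]
    simp [pvPassN]
  | succ t ih =>
    intro pre cur c s h
    match cur, h with
    | x :: y :: r, hh =>
      rw [PySem.List.pyRange_one_cons (by push_cast; omega)]
      rw [List.foldl_cons]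
      have hg1 : PySem.List.pyGetD (pre ++ x :: y :: r) (pre.length) 0 = x := by
        rw [PySem.List.pyGetD_natCast]; exact pvGetD_append_mid pre (y :: r) x 0
      have hg2 : PySem.List.pyGetD (pre ++ x :: y :: r) ((pre.length : Int) + 1) 0 = y := by
        rw [show ((pre.length : Int) + 1) = (((pre.length + 1 : Nat) : Int)) by push_cast; ring]
        rw [PySem.List.pyGetD_natCast]; exact pvGetD_append_mid1 pre r x y 0
      by_cases hxy : y < x
      · have hsetA : PySem.List.pySetD (pre ++ x :: y :: r) (pre.length) y = pre ++ y :: y :: r := by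
          rw [PySem.List.pySetD_natCast]
          simp
        have hsetB : PySem.List.pySetD (pre ++ y :: y :: r) ((pre.length : Int) + 1) x
            = pre ++ y :: x :: r := by
          rw [show ((pre.length : Int) + 1) = (((pre.length + 1 : Nat) : Int)) by push_cast; ring]
          rw [PySem.List.pySetD_natCast]
          simp
        have hset : pvStep (pre ++ x :: y :: r, c, s) (pre.length) = (pre ++ y :: x :: r, c + 1, s + 1) := by
          simp only [pvStep, hg1, hg2]
          rw [if_pos (by omega), hsetA, hsetB]
        rw [hset]
        have key := ih (pre ++ [y]) (x :: r) (c + 1) (s + 1) (by simp at hh ⊢; omega)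
        rw [show (((pre ++ [y]).length : Nat) : Int) = (pre.length : Int) + 1 by simp] at key
        rw [show ((pre.length : Int) + 1 + (t : Int)) = (pre.length : Int) + ((t + 1 : Nat) : Int) by push_cast; ring] at key
        rw [show (pre ++ [y]) ++ x :: r = pre ++ y :: x :: r by simp] at key
        rw [key]
        simp only [pvPassN, if_pos hxy, List.append_assoc, List.cons_append, List.nil_append]
        refine congrArg₂ Prod.mk rfl (congrArg₂ Prod.mk ?_ ?_) <;> push_cast <;> ring
      · have hset : pvStep (pre ++ x :: y :: r, c, s) (pre.length) = (pre ++ x :: y :: r, c + 1, s) := by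
          simp only [pvStep, hg1, hg2]
          rw [if_neg (by omega)]
        rw [hset]
        have key := ih (pre ++ [x]) (y :: r) (c + 1) s (by simp at hh ⊢; omega)
        rw [show (((pre ++ [x]).length : Nat) : Int) = (pre.length : Int) + 1 by simp] at key
        rw [show ((pre.length : Int) + 1 + (t : Int)) = (pre.length : Int) + ((t + 1 : Nat) : Int) by push_cast; ring] at key
        rw [show (pre ++ [x]) ++ y :: r = pre ++ x :: y :: r by simp] at key
        rw [key]
        simp only [pvPassN, if_neg hxy, List.append_assoc, List.cons_append, List.nil_append]
        refine congrArg₂ Prod.mk rfl (congrArg₂ Prod.mk ?_ ?_) <;> push_cast <;> ring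

theorem pvComps_closed (n : Nat) : ∀ i : Nat, 2 * pvComps n i = (i : Int) * (2 * (n : Int) - i - 1) := by
  intro i
  induction i with
  | zero => simp [pvComps]
  | succ i ih =>
    simp only [pvComps]
    push_cast
    push_cast at ih
    linear_combination ih

theorem pvOuter (arr : List Int) : ∀ (i : Nat), i ≤ arr.length →
    ∃ a b,
      ((PySem.List.pyRange 0 i 1).foldl
          (fun st k =>
            (PySem.List.pyRange 0 ((arr.length : Int) - k - 1) 1).foldl pvStep st)
          (arr, 0, 0)) = (a ++ b, pvComps arr.length i, (pvInv arr : Int) - (pvInv (a ++ b) : Int)) ∧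
      a.length = arr.length - i ∧ b.Pairwise (· ≤ ·) ∧ (∀ u ∈ a, ∀ v ∈ b, u ≤ v) ∧
      (a ++ b).Perm arr := by
  intro i
  induction i with
  | zero =>
    intro _
    refine ⟨arr, [], ?_, by simp, by simp, by simp, by simp⟩
    rw [PySem.List.pyRange_one_eq_nil (by simp)]
    simp [pvComps]
  | succ i ih =>
    intro hi
    obtain ⟨a, b, hst, hlen, hsb, hab, hperm⟩ := ih (by omega)
    have ha : a ≠ [] := by
      intro hnil
      rw [hnil] at hlen
      simp at hlen
      omega
    have ha1 : 1 ≤ a.length := List.length_pos_iff.2 ha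
    rw [show ((i + 1 : Nat) : Int) = (i : Int) + 1 by push_cast; ring,
        PySem.List.pyRange_one_succ_right (by positivity), List.foldl_append, hst]
    simp only [List.foldl_cons, List.foldl_nil]
    have hlab : (a ++ b).length = arr.length := hperm.length_eq
    have hb1 : ((arr.length : Int) - i - 1) = ((a.length - 1 : Nat) : Int) := by
      simp only [List.length_append] at hlab
      omega
    rw [hb1]
    have key := pvInner_bridge (a.length - 1) [] (a ++ b) (pvComps arr.length i)
      ((pvInv arr : Int) - (pvInv (a ++ b) : Int)) (by simp; omega)
    simp only [List.length_nil, Nat.cast_zero, zero_add, List.nil_append] at key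
    rw [key]
    obtain ⟨a', M, hsplit, hmax⟩ := pvPassN_last_max a ha
    have happ := pvPassN_append a b ha
    have hpassperm : (pvPassN (a.length - 1) a).1.Perm a := pvPassN_perm _ a
    have hMa : M ∈ a := hpassperm.mem_iff.1 (by rw [hsplit]; simp)
    have hsub : ∀ u ∈ a', u ∈ a := by
      intro u hu
      exact hpassperm.mem_iff.1 (by rw [hsplit]; simp [hu])
    have hlen' : a'.length + 1 = a.length := by
      have := hpassperm.length_eq
      rw [hsplit] at this
      simpa using this
    refine ⟨a', M :: b, ?_, by omega, ?_, ?_, ?_⟩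
    · have hB2 := pvPassN_inv (a.length - 1) (a ++ b)
      rw [happ] at hB2 ⊢
      rw [hsplit] at hB2 ⊢
      have hshape : (a' ++ [M]) ++ b = a' ++ M :: b := by simp
      rw [hshape] at hB2 ⊢
      dsimp only at hB2 ⊢
      refine congrArg₂ Prod.mk rfl (congrArg₂ Prod.mk ?_ ?_)
      · show pvComps arr.length i + _ = pvComps arr.length (i + 1)
        simp only [pvComps]
        omega
      · omega
    · exact List.pairwise_cons.2 ⟨fun v hv => hab M hMa v hv, hsb⟩
    · intro u hu v hv
      rcases List.mem_cons.1 hv with rfl | hv2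
      · exact hmax u (hsub u hu)
      · exact hab u (hsub u hu) v hv2
    · have h1 : (a' ++ M :: b).Perm ((a' ++ [M]) ++ b) := by simp
      refine h1.trans ?_
      rw [← hsplit]
      exact (hpassperm.append (List.Perm.refl b)).trans hperm

-- ===== VERDICT (by name: the statement is the Claim_ definition above) =====
theorem bubble_sort_basic_spec : Claim_equal_bubble_sort_basic := by
  intro arr _
  show bubble_sort_basic arr = bubble_sort_basic_alt arr
  have hA : bubble_sort_basic arr
      = ((PySem.List.pyRange 0 (arr.length) 1).foldl
          (fun st k =>
            (PySem.List.pyRange 0 ((arr.length : Int) - k - 1) 1).foldl pvStep st)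
          (arr, 0, 0)) := rfl
  obtain ⟨a, b, hst, hlen0, hsb, hab, hperm⟩ := pvOuter arr arr.length le_rfl
  have ha : a = [] := List.length_eq_zero_iff.1 (by omega)
  subst ha
  simp only [List.nil_append] at hst hperm
  obtain ⟨p1, s1, i1⟩ := pvSortCount_spec arr
  have hb0 : pvInv b = 0 := pvInv_eq_zero_of_sorted hsb
  have hlist : b = (pvSortCount arr).1 :=
    (hperm.trans p1.symm).eq_of_pairwise (fun x y _ _ h1 h2 => le_antisymm h1 h2) hsb s1
  have hcomp : pvComps arr.length arr.length
      = PySem.Int.floordiv ((arr.length : Int) * ((arr.length : Int) - 1)) 2 := by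
    have h2 : 2 * pvComps arr.length arr.length
        = (arr.length : Int) * ((arr.length : Int) - 1) := by
      linear_combination pvComps_closed arr.length arr.length
    rw [PySem.Int.floordiv_eq_ediv_of_pos (by norm_num)]
    omega
  rw [hA, hst]
  show _ = ((pvSortCount arr).1, PySem.Int.floordiv ((arr.length : Int) * ((arr.length : Int) - 1)) 2, (pvSortCount arr).2)
  rw [i1, hb0, ← hlist, hcomp]
  simp
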